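-- pv_equiv track=rewrite | github.com/tipsyboy/Algorithm | BOJ/category/Data Structure - 자료구조/1000-/5397_키로거.py | hack
-- ===== SOURCE A (Python) =====
-- def hack(init: str) -> str:
--     left = []
--     right = []
--
--     for char in init:
--         if char == "<":
--             if left:
--                 right.append(left.pop())
--         elif char == ">":
--             if right:
--                 left.append(right.pop())
--         elif char == "-":
--             if left:
--                 left.pop()
--         else:
--             left.append(char)
--
--     return "".join(left) + "".join(right[::-1])
-- ===== SOURCE B (Python) =====
-- def hack(init: str) -> str:
--     buf = []
--     pos = 0
--     for char in init:
--         if char == "<":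
--             pos = max(0, pos - 1)
--         elif char == ">":
--             pos = min(len(buf), pos + 1)
--         elif char == "-":
--             if pos > 0:
--                 del buf[pos - 1]
--                 pos -= 1
--         else:
--             buf.insert(pos, char)
--             pos += 1
--     return "".join(buf)
-- ===== Notes on version B (the rewrite author's own statement) =====
-- stated objective: simpler
-- what changed: Replaces the two-stack representation (left/right with pops and pushes on cursor moves) by a single buffer list plus an integer cursor index, inserting and deleting in the middle of the list.
import Mathlib
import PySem

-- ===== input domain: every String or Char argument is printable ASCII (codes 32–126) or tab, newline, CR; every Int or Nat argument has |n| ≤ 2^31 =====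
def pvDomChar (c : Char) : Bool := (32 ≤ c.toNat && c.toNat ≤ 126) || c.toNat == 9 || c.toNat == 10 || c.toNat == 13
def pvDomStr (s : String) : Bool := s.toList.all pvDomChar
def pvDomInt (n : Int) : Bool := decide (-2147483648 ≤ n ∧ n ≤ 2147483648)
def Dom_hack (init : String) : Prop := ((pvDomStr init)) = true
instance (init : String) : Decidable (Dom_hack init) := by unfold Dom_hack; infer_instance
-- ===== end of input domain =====

-- B replaces A's two stacks by one buffer list plus a cursor index (simpler decomposition, same cost class).

-- ===== PORT A =====
-- Stacks stored top-at-head (Python's append/pop at the end of the list become cons/tail here).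
def hackStep (st : List Char × List Char) (c : Char) : List Char × List Char :=
  if c = '<' then
    match st.1 with
    | [] => st
    | x :: l => (l, x :: st.2)
  else if c = '>' then
    match st.2 with
    | [] => st
    | y :: r => (y :: st.1, r)
  else if c = '-' then
    match st.1 with
    | [] => st
    | _ :: l => (l, st.2)
  else (c :: st.1, st.2)

def hack (init : String) : String :=
  let st := init.toList.foldl hackStep ([], [])
  -- "".join(left) + "".join(right[::-1]): with top-at-head storage this is left.reverse ++ right
  String.mk (st.1.reverse ++ st.2)

-- ===== PORT B =====
-- Single buffer plus cursor position; Nat subtraction is exactly Python's max(0, pos-1).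
def hackAltStep (st : List Char × Nat) (c : Char) : List Char × Nat :=
  if c = '<' then (st.1, st.2 - 1)
  else if c = '>' then (st.1, min st.1.length (st.2 + 1))
  else if c = '-' then
    if st.2 > 0 then (st.1.eraseIdx (st.2 - 1), st.2 - 1) else st
  else (st.1.insertIdx st.2 c, st.2 + 1)

def hack_alt (init : String) : String :=
  String.mk (init.toList.foldl hackAltStep ([], 0)).1

-- ===== PRECONDITION & SPEC =====
def Spec_hack (init : String) (out : String) : Prop := out = hack_alt init
instance (init : String) (out : String) : Decidable (Spec_hack init out) := by unfold Spec_hack; infer_instance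

-- ===== CLAIM (what is proved, stated in full; the proofs are below) =====
def Claim_equal_hack : Prop := ∀ (init : String), Dom_hack init → Spec_hack init (hack init)

-- ===== LEMMAS AND PROOFS =====

theorem pv_eraseIdx_at (as bs : List Char) (x : Char) :
    (as ++ x :: bs).eraseIdx as.length = as ++ bs := by
  induction as with
  | nil => rfl
  | cons a as ih => simp [ih]

theorem pv_insertIdx_at (as bs : List Char) (x : Char) :
    (as ++ bs).insertIdx as.length x = as ++ x :: bs := by
  induction as with
  | nil => rfl
  | cons a as ih => simp [List.insertIdx_succ_cons, ih]

-- Invariant: B's state is (left.reverse ++ right, left.length) for A's state (left, right).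
theorem pv_step_rel (c : Char) (l r : List Char) :
    hackAltStep (l.reverse ++ r, l.length) c =
      ((hackStep (l, r) c).1.reverse ++ (hackStep (l, r) c).2,
       (hackStep (l, r) c).1.length) := by
  unfold hackStep hackAltStep
  by_cases h1 : c = '<'
  · cases l with
    | nil => simp [h1]
    | cons x l => simp [h1]
  · by_cases h2 : c = '>'
    · cases r with
      | nil => simp [h1, h2]
      | cons y r => simp [h2]
    · by_cases h3 : c = '-'
      · cases l with
        | nil => simp [h1, h2, h3]
        | cons x l =>
          simp only [h3, if_neg h1, if_neg h2, if_pos rfl, List.length_cons]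
          simp only [List.reverse_cons, List.append_assoc, List.cons_append, List.nil_append]
          have := pv_eraseIdx_at l.reverse r x
          simp only [List.length_reverse] at this
          simp [this]
      · simp only [h1, h2, h3, if_neg, not_false_iff]
        have := pv_insertIdx_at l.reverse r c
        simp only [List.length_reverse] at this
        simp [this]

theorem pv_fold_rel (cs : List Char) (l r : List Char) :
    cs.foldl hackAltStep (l.reverse ++ r, l.length) =
      ((cs.foldl hackStep (l, r)).1.reverse ++ (cs.foldl hackStep (l, r)).2,
       (cs.foldl hackStep (l, r)).1.length) := by
  induction cs generalizing l r with
  | nil => rfl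
  | cons c cs ih =>
    simp only [List.foldl_cons, pv_step_rel]
    cases h : hackStep (l, r) c with
    | mk l' r' =>
      have := ih l' r'
      simp_all

-- ===== VERDICT (by name: the statement is the Claim_ definition above) =====
theorem hack_spec : Claim_equal_hack := by
  intro init _
  unfold Spec_hack hack hack_alt
  have := pv_fold_rel init.toList [] []
  simp only [List.reverse_nil, List.nil_append, List.length_nil] at this
  rw [this]
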